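-- pv_equiv track=rewrite | github.com/shuque/minimal_nsec | detect_ultradns_nsec.py | expected_predecessor_label
-- ===== SOURCE A (Python) =====
-- ULTRADNS_ALPHABET = "!-0123456789_abcdefghijklmnopqrstuvwxyz~"
--
-- PREV_CHAR = {}
--
-- def expected_predecessor_label(qname_label):
--     """
--     Compute the expected UltraDNS predecessor base label for a given label.
--     Returns the modified label (without the leading ~ child labels).
--     The actual predecessor will be one or more ~ child labels prepended
--     to this base label.
--     """
--     label = qname_label.lower()
--     last_char = label[-1]
--
--     if last_char in PREV_CHAR:
--         prev = PREV_CHAR[last_char]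
--     else:
--         for i in range(len(ULTRADNS_ALPHABET) - 1, -1, -1):
--             if ULTRADNS_ALPHABET[i] < last_char:
--                 prev = ULTRADNS_ALPHABET[i]
--                 break
--         else:
--             return label[:-1]
--
--     return label[:-1] + prev + "~"
-- ===== SOURCE B (Python) =====
-- ULTRADNS_ALPHABET = "!-0123456789_abcdefghijklmnopqrstuvwxyz~"
--
-- def expected_predecessor_label(qname_label):
--     label = qname_label.lower()
--     last_char = label[-1]
--     # binary search (bisect_left) over the sorted alphabet for the
--     # largest character strictly smaller than last_char
--     lo, hi = 0, len(ULTRADNS_ALPHABET)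
--     while lo < hi:
--         mid = (lo + hi) // 2
--         if ULTRADNS_ALPHABET[mid] < last_char:
--             lo = mid + 1
--         else:
--             hi = mid
--     if lo == 0:
--         return label[:-1]
--     return label[:-1] + ULTRADNS_ALPHABET[lo - 1] + "~"
-- ===== Notes on version B (the rewrite author's own statement) =====
-- stated objective: alternative
-- what changed: Replaced A's backward linear scan of the 40-char alphabet for the largest character smaller than the label's last character by a hand-rolled bisect_left binary search over the sorted alphabet.
import Mathlib
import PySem

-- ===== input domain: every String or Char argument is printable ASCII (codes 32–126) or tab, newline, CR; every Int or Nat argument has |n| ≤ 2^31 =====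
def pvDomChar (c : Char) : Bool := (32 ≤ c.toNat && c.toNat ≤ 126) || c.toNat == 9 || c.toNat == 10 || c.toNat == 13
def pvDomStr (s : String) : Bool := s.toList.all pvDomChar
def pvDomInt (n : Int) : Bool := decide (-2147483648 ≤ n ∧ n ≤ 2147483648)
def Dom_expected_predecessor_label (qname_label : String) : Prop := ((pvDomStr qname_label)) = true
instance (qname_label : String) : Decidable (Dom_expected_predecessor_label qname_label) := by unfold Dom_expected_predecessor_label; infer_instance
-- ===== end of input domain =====

-- B replaces A's backward linear scan of the alphabet by a binary search (bisect_left)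
-- over the sorted constant alphabet; objective: alternative algorithm, same behaviour.

-- ===== PORT A =====
def pvUltra : List Char := "!-0123456789_abcdefghijklmnopqrstuvwxyz~".toList

-- A's 'for i in range(len(ULTRADNS_ALPHABET)-1, -1, -1): if ULTRA[i] < last: prev = ULTRA[i]; break' / 'else: …'
def pvScanPrev (c : Char) : List Int → Option Char
  | [] => none                       -- the for-else branch: no break happened
  | i :: rest =>
    match PySem.List.pyGet? pvUltra i with
    | some ch => if ch < c then some ch else pvScanPrev c rest
    | none => pvScanPrev c rest      -- unreachable: every index the range produces is in bounds

def expected_predecessor_label (qname_label : String) : String :=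
  let label := PySem.Chars.lower qname_label.toList
  match PySem.List.pyGet? label (-1) with
  | none => ""                       -- Python raises IndexError here; excluded by Pre_
  | some last_char =>
      match pvScanPrev last_char (PySem.List.pyRange ((pvUltra.length : Int) - 1) (-1) (-1)) with
      | none => String.ofList (PySem.List.slice label none (some (-1)))
      | some prev => String.ofList (PySem.List.slice label none (some (-1)) ++ [prev, '~'])

-- ===== PORT B =====
-- Source B's 'while lo < hi' bisect_left loop; lo, hi stay in [0, len] so they are kept as Nat,
-- and 'hi - lo' (which strictly decreases each iteration) is passed as structural fuel.
def pvBisectGo (c : Char) : Nat → Nat → Nat → Nat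
  | 0, lo, _ => lo
  | fuel + 1, lo, hi =>
    if lo < hi then
      let mid := (lo + hi) / 2
      if pvUltra.getD mid ' ' < c then pvBisectGo c fuel (mid + 1) hi else pvBisectGo c fuel lo mid
    else lo

def pvBisect (c : Char) (lo hi : Nat) : Nat := pvBisectGo c (hi - lo) lo hi

def expected_predecessor_label_alt (qname_label : String) : String :=
  let label := PySem.Chars.lower qname_label.toList
  match PySem.List.pyGet? label (-1) with
  | none => ""                       -- Source B raises IndexError here too; excluded by Pre_
  | some last_char =>
      let lo := pvBisect last_char 0 pvUltra.length
      if lo = 0 then String.ofList (PySem.List.slice label none (some (-1)))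
      else String.ofList (PySem.List.slice label none (some (-1)) ++ [pvUltra.getD (lo - 1) ' ', '~'])

-- ===== PRECONDITION & SPEC =====
-- Pre_ excludes only the empty string, on which Python A raises IndexError at label[-1].
def Pre_expected_predecessor_label (qname_label : String) : Prop := qname_label ≠ ""
instance (qname_label : String) : Decidable (Pre_expected_predecessor_label qname_label) := by unfold Pre_expected_predecessor_label; infer_instance
def pvWitness_expected_predecessor_label : String := "abc"

def Spec_expected_predecessor_label (qname_label : String) (out : String) : Prop := out = expected_predecessor_label_alt qname_label
instance (qname_label : String) (out : String) : Decidable (Spec_expected_predecessor_label qname_label out) := by unfold Spec_expected_predecessor_label; infer_instance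

-- ===== CLAIM (what is proved, stated in full; the proofs are below) =====
def Claim_equal_expected_predecessor_label : Prop := ∀ (qname_label : String), Dom_expected_predecessor_label qname_label → Pre_expected_predecessor_label qname_label → Spec_expected_predecessor_label qname_label (expected_predecessor_label qname_label)

-- ===== LEMMAS AND PROOFS =====

-- A's backward scan and B's binary search compute the same predecessor, for every ASCII char
set_option maxRecDepth 8192 in
theorem pvPrev_eq_fin : ∀ n : Fin 128,
    pvScanPrev (Char.ofNat n) (PySem.List.pyRange ((pvUltra.length : Int) - 1) (-1) (-1)) =
      (if pvBisect (Char.ofNat n) 0 pvUltra.length = 0 then none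
       else some (pvUltra.getD (pvBisect (Char.ofNat n) 0 pvUltra.length - 1) ' ')) := by decide

theorem pvCharOfNat_toNat (n : Nat) (h : n < 55296) : (Char.ofNat n).toNat = n := by
  rw [Char.toNat_ofNat, if_pos (Or.inl h)]

theorem pvPrev_eq (c : Char) (h : c.toNat < 128) :
    pvScanPrev c (PySem.List.pyRange ((pvUltra.length : Int) - 1) (-1) (-1)) =
      (if pvBisect c 0 pvUltra.length = 0 then none
       else some (pvUltra.getD (pvBisect c 0 pvUltra.length - 1) ' ')) := by
  have h2 : Char.ofNat c.toNat = c := Char.ofNat_toNat c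
  have := pvPrev_eq_fin ⟨c.toNat, h⟩
  simpa [h2] using this

-- lowercasing a character admitted by the domain stays in ASCII
theorem pvLower_ascii (c : Char) (h : pvDomChar c = true) :
    (PySem.Chars.lowerChar c).toNat < 128 := by
  simp only [pvDomChar, Bool.or_eq_true, Bool.and_eq_true, decide_eq_true_eq, beq_iff_eq] at h
  unfold PySem.Chars.lowerChar PySem.Chars.isupper
  split
  · next hup =>
    simp only [Bool.and_eq_true, decide_eq_true_eq] at hup
    have h1 : c.toNat ≤ 90 := Fin.mk_le_mk.mp hup.2
    rw [pvCharOfNat_toNat (c.toNat + 32) (by omega)]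
    omega
  · omega

-- ===== VERDICT (by name: the statement is the Claim_ definition above) =====
theorem expected_predecessor_label_spec : Claim_equal_expected_predecessor_label := by
  intro q hdom hpre
  unfold Spec_expected_predecessor_label expected_predecessor_label expected_predecessor_label_alt
  cases h : PySem.List.pyGet? (PySem.Chars.lower q.toList) (-1) with
  | none => simp [h]
  | some last =>
    have hmem : last ∈ PySem.Chars.lower q.toList := PySem.List.mem_of_pyGet?_eq_some _ h
    have hlt : last.toNat < 128 := by
      simp only [PySem.Chars.lower, List.mem_map] at hmem
      obtain ⟨a, ha, rfl⟩ := hmem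
      refine pvLower_ascii a ?_
      have hd := hdom
      unfold Dom_expected_predecessor_label pvDomStr at hd
      exact (List.all_eq_true.mp hd) a ha
    simp only [h, pvPrev_eq last hlt]
    by_cases h0 : pvBisect last 0 pvUltra.length = 0 <;> simp [h0]
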